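-- pv_equiv track=rewrite | github.com/discopop-project/discopop | graph_analyzer/plugins/pipeline.py | get_mergeable_nodes
-- ===== SOURCE A (Python) =====
-- def get_mergeable_nodes(matrix):
--     res = []
--     for i in reversed(range(1, len(matrix))):
--         if matrix[i] == matrix[i - 1]:
--             same = True
--             for j in range(1, len(matrix)):
--                 if matrix[j][i] != matrix[j][i - 1]:
--                     same = False
--             if same:
--                 res.append(i)
--     return res
-- ===== SOURCE B (Python) =====
-- def get_mergeable_nodes(matrix):
--     cand = [i for i in range(1, len(matrix)) if matrix[i] == matrix[i - 1]]
--     for row in matrix[1:]: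
--         cand = [i for i in cand if row[i] == row[i - 1]]
--     return cand[::-1]
-- ===== Notes on version B (the rewrite author's own statement) =====
-- stated objective: alternative
-- what changed: B first builds a candidate list of indices whose adjacent rows are equal, then shrinks that list with one filtering pass per row (each row removes candidates whose two adjacent entries differ), and finally reverses it; A instead tests each index with a nested flag-setting element-by-element column scan.
import Mathlib
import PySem

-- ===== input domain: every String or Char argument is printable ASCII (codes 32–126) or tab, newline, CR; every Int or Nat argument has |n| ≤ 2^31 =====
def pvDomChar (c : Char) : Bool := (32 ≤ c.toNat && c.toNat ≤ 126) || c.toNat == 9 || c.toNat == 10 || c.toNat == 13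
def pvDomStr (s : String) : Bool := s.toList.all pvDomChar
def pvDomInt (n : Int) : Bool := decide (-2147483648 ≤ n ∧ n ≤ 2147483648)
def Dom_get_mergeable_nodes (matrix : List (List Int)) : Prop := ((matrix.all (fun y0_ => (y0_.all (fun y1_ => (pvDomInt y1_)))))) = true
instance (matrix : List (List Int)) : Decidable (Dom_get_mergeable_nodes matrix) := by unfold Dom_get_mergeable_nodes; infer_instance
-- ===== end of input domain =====

-- B keeps a candidate list (first filtered by row equality) and shrinks it row by row
-- with one filtering pass per row, instead of A's per-index nested column scan with a flag
-- (objective: alternative decomposition).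

-- ===== PORT A =====
def get_mergeable_nodes (matrix : List (List Int)) : List Int :=
  (PySem.List.pyRange 1 (matrix.length : Int) 1).reverse.foldl
    (fun res i =>
      if PySem.List.pyGet? matrix i = PySem.List.pyGet? matrix (i - 1) then
        let same := (PySem.List.pyRange 1 (matrix.length : Int) 1).foldl
          (fun same j =>
            if PySem.List.pyGet? ((PySem.List.pyGet? matrix j).getD []) i ≠
               PySem.List.pyGet? ((PySem.List.pyGet? matrix j).getD []) (i - 1)
            then false else same) true
        if same then res ++ [i] else res
      else res) []

-- ===== PORT B =====
def get_mergeable_nodes_alt (matrix : List (List Int)) : List Int :=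
  let cand0 := (PySem.List.pyRange 1 (matrix.length : Int) 1).filter
    (fun i => decide (PySem.List.pyGet? matrix i = PySem.List.pyGet? matrix (i - 1)))
  let cand := (PySem.List.slice matrix (some 1) none).foldl
    (fun cand row => cand.filter
      (fun i => decide (PySem.List.pyGet? row i = PySem.List.pyGet? row (i - 1)))) cand0
  cand.reverse   -- cand[::-1] (PySem.List.slice?_none_none_neg_one: [::-1] is reverse)

-- ===== PRECONDITION & SPEC =====
-- Pre_ excludes exactly the ragged matrices on which Python A raises IndexError:
-- those where some adjacent rows i-1, i are equal but some row j in [1, n) is shorter than i+1.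
def Pre_get_mergeable_nodes (matrix : List (List Int)) : Prop :=
  ∀ i ∈ List.range matrix.length, 1 ≤ i → matrix.getD i [] = matrix.getD (i - 1) [] →
    ∀ row ∈ matrix.drop 1, i < row.length
instance (matrix : List (List Int)) : Decidable (Pre_get_mergeable_nodes matrix) := by
  unfold Pre_get_mergeable_nodes; infer_instance

def pvWitness_get_mergeable_nodes : List (List Int) := [[7, 7, 7], [7, 7, 7], [7, 7, 7]]

def Spec_get_mergeable_nodes (matrix : List (List Int)) (out : List Int) : Prop := out = get_mergeable_nodes_alt matrix
instance (matrix : List (List Int)) (out : List Int) : Decidable (Spec_get_mergeable_nodes matrix out) := by unfold Spec_get_mergeable_nodes; infer_instance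

-- ===== CLAIM (what is proved, stated in full; the proofs are below) =====
def Claim_equal_get_mergeable_nodes : Prop := ∀ (matrix : List (List Int)), Dom_get_mergeable_nodes matrix → Pre_get_mergeable_nodes matrix → Spec_get_mergeable_nodes matrix (get_mergeable_nodes matrix)

-- ===== LEMMAS AND PROOFS =====

-- A's inner flag loop: once the flag is false it stays false; it computes "no j violates".
theorem flag_foldl_eq_all (l : List Int) (c : Int → Prop) [DecidablePred c] (b : Bool) :
    l.foldl (fun s j => if c j then false else s) b = (b && l.all (fun j => ! decide (c j))) := by
  induction l generalizing b with
  | nil => simp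
  | cons x xs ih =>
      simp only [List.foldl_cons, List.all_cons, ih]
      by_cases h : c x <;> simp [h]

-- iterating j over range(1, len(matrix)) and indexing is iterating over matrix.drop 1
theorem forall_pyRange_index_iff (matrix : List (List Int)) (P : List Int → Prop) :
    (∀ j ∈ PySem.List.pyRange 1 (matrix.length : Int) 1, P ((PySem.List.pyGet? matrix j).getD [])) ↔
    (∀ row ∈ matrix.drop 1, P row) := by
  constructor
  · intro h row hrow
    obtain ⟨k, hk, hget⟩ := List.getElem_of_mem hrow
    rw [List.length_drop] at hk
    have hk' : 1 + k < matrix.length := by omega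
    have := h ((1 + k : ℕ) : Int) (by
      rw [PySem.List.mem_pyRange_one]
      constructor <;> [exact_mod_cast Nat.le_add_right 1 k; exact_mod_cast hk'])
    rw [PySem.List.pyGet?_natCast] at this
    have hgete : matrix[1 + k]? = some row := by
      rw [List.getElem?_eq_getElem hk']
      rw [← hget, List.getElem_drop]
    rwa [hgete] at this
  · intro h j hj
    rw [PySem.List.mem_pyRange_one] at hj
    have h0 : 0 ≤ j := by omega
    rw [PySem.List.pyGet?_eq_some_getElem matrix h0 (by exact_mod_cast hj.2)]
    have hlt : j.toNat < matrix.length := by omega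
    have h1 : 1 ≤ j.toNat := by omega
    have hmem : matrix[j.toNat] ∈ matrix.drop 1 := by
      have hlt' : j.toNat - 1 < (matrix.drop 1).length := by
        rw [List.length_drop]; omega
      have : (matrix.drop 1)[j.toNat - 1] = matrix[j.toNat] := by
        rw [List.getElem_drop]
        congr 1
        omega
      rw [← this]
      exact List.getElem_mem _
    exact h _ hmem

-- A's inner column scan over j agrees with per-row equality over matrix.drop 1
theorem inner_all_eq (matrix : List (List Int)) (i : Int) :
    ((PySem.List.pyRange 1 (matrix.length : Int) 1).all
        (fun j => ! decide (PySem.List.pyGet? ((PySem.List.pyGet? matrix j).getD []) i ≠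
                    PySem.List.pyGet? ((PySem.List.pyGet? matrix j).getD []) (i - 1))))
      = (matrix.drop 1).all
          (fun row => decide (PySem.List.pyGet? row i = PySem.List.pyGet? row (i - 1))) := by
  rw [Bool.eq_iff_iff]
  simp only [List.all_eq_true, Bool.not_eq_eq_eq_not, Bool.not_true, decide_eq_false_iff_not,
    not_not, decide_eq_true_eq]
  exact forall_pyRange_index_iff matrix
    (fun row => PySem.List.pyGet? row i = PySem.List.pyGet? row (i - 1))

-- B's row-by-row candidate filtering equals one filter by "every row passes"
theorem foldl_filter_eq_filter_all (rows : List (List Int)) (l : List Int)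
    (p : List Int → Int → Bool) :
    rows.foldl (fun c r => c.filter (p r)) l = l.filter (fun i => rows.all (fun r => p r i)) := by
  induction rows generalizing l with
  | nil => simp
  | cons r rs ih =>
      simp only [List.foldl_cons, ih, List.filter_filter, List.all_cons]
      congr 1
      funext i
      exact Bool.and_comm _ _

theorem get_mergeable_nodes_eq_alt (matrix : List (List Int)) :
    get_mergeable_nodes matrix = get_mergeable_nodes_alt matrix := by
  unfold get_mergeable_nodes get_mergeable_nodes_alt
  simp only [PySem.List.slice_from_one, ← List.drop_one]
  rw [foldl_filter_eq_filter_all, List.filter_filter]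
  rw [PySem.List.foldl_congr_mem'
    (g := fun res i =>
      if ((matrix.drop 1).all (fun r =>
            decide (PySem.List.pyGet? r i = PySem.List.pyGet? r (i - 1))) &&
          decide (PySem.List.pyGet? matrix i = PySem.List.pyGet? matrix (i - 1))) = true
      then res ++ [i] else res)]
  · rw [PySem.List.foldl_append_if_eq_filter, List.nil_append, List.filter_reverse]
  · intro i _ res
    simp only [flag_foldl_eq_all, Bool.true_and, inner_all_eq]
    by_cases h1 : PySem.List.pyGet? matrix i = PySem.List.pyGet? matrix (i - 1)
    · rw [if_pos h1, decide_eq_true h1, Bool.and_true]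
    · rw [if_neg h1, decide_eq_false h1, Bool.and_false, if_neg (by simp)]

-- ===== VERDICT (by name: the statement is the Claim_ definition above) =====
theorem get_mergeable_nodes_spec : Claim_equal_get_mergeable_nodes := by
  intro matrix _ _
  exact get_mergeable_nodes_eq_alt matrix
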